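-- pv_equiv track=rewrite | github.com/yanyan5420/MetAssimulo_2 | simulate_2D/match_names.py | input_match_db
-- ===== SOURCE A (Python) =====
-- def db_names_match_hmdb(format_norm_data_dict, hmdb_dict):
--     db_names_ids_dict = dict()
--     for name in format_norm_data_dict.keys():
--         id_list = []
--         for idx, name_list in hmdb_dict.items():
--             if name in name_list:
--                 id_list.append(idx)
--         db_names_ids_dict[name] = id_list
--
--     return db_names_ids_dict
--
-- def input_match_db(mixture_list, match_data_dict, hmdb_dict):
--     # format input mixtures
--     format_mixture_list = []
--     for meta_name in mixture_list:
--         lower_meta_name = meta_name.lower()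
--         if lower_meta_name[1] == '_' or lower_meta_name[2] == '_':
--             lower_meta_name = lower_meta_name.replace("_", "-", 1)
--         lower_meta_name = ' '.join(lower_meta_name.split("_"))
--
--         if "acid" in lower_meta_name:
--             lower_meta_name = ' '.join(lower_meta_name.split("acid")).strip(' ') + ' acid'
--         format_mixture_list.append(lower_meta_name)
--
--     # get the db match hmdb ids dict
--     db_names_ids_dict = db_names_match_hmdb(match_data_dict, hmdb_dict)
--
--     # match input mixtures with db names
--     mixture_match_db_list = []
--     for meta_name in format_mixture_list:
--         if meta_name in match_data_dict.keys():
--             mixture_match_db_list.append(meta_name)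
--         else:
--             idx_list = []
--             for idx, name_list in hmdb_dict.items():
--                 if meta_name in name_list:
--                     idx_list.append(idx)
--             for db_name, db_idx_list in db_names_ids_dict.items():
--                 if set(idx_list).intersection(set(db_idx_list)):
--                     mixture_match_db_list.append(db_name)
--
--     return mixture_match_db_list
-- ===== SOURCE B (Python) =====
-- def input_match_db(mixture_list, match_data_dict, hmdb_dict):
--     def format_name(meta_name):
--         s = meta_name.lower()
--         if s[1] == '_' or s[2] == '_':
--             s = s.replace("_", "-", 1)
--         s = ' '.join(s.split("_"))
--         if "acid" in s:
--             s = ' '.join(s.split("acid")).strip(' ') + ' acid'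
--         return s
--
--     # inverted index: name -> list of hmdb ids whose name list mentions it (one pass)
--     name_to_ids = {}
--     for idx, name_list in hmdb_dict.items():
--         for n in name_list:
--             name_to_ids.setdefault(n, []).append(idx)
--
--     # per-db-name id sets, computed once
--     db_sets = [(d, set(name_to_ids.get(d, []))) for d in match_data_dict]
--
--     out = []
--     for meta_name in mixture_list:
--         m = format_name(meta_name)
--         if m in match_data_dict:
--             out.append(m)
--         else:
--             ids_m = set(name_to_ids.get(m, []))
--             out.extend(d for d, s in db_sets if not ids_m.isdisjoint(s))
--     return out
-- ===== Notes on version B (the rewrite author's own statement) =====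
-- stated objective: alternative
-- what changed: A rescans the whole hmdb dict and rebuilds id sets for every mixture name and every db name; B instead builds a name->ids inverted index and per-db-name id sets once up front and does one index lookup plus set-disjointness tests per mixture name (same measured cost on the generated inputs).
import Mathlib
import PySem

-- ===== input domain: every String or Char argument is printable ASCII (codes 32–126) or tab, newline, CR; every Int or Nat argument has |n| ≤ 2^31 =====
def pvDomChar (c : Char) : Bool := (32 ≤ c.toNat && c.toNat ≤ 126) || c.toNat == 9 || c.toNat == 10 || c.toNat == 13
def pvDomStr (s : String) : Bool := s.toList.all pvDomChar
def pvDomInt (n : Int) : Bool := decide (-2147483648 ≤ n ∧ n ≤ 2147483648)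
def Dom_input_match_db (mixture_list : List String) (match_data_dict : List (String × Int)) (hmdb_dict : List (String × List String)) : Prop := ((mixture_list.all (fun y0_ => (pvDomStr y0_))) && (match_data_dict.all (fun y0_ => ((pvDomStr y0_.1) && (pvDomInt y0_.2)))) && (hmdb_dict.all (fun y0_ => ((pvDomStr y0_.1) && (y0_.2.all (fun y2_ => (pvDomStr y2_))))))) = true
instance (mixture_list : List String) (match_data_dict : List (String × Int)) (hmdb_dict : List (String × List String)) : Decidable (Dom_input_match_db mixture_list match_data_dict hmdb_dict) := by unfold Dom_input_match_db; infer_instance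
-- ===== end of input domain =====

-- B replaces A's per-mixture rescans of the hmdb dict (and per-pair set rebuilding) by a
-- name→ids inverted index and per-db-name id sets built once; objective: alternative.


-- shared straight-line helpers (the name-formatting block is IDENTICAL in Source A and Source B;
-- it is ported once and used by both ports)

-- exact port of s.replace("_", "-", 1) for the single-character arguments used here
def pvReplaceFirstUS : List Char → List Char
  | [] => []
  | c :: t => if c = '_' then '-' :: t else c :: pvReplaceFirstUS t

def pvFmtName (meta_name : String) : String :=
  let s := PySem.Str.lower meta_name
  let s :=
    match PySem.Str.pyGet? s 1 with
    | none => s  -- Python raises IndexError here; unreachable under Pre_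
    | some c1 =>
      if c1 = '_' then String.ofList (pvReplaceFirstUS s.toList)
      else
        match PySem.Str.pyGet? s 2 with
        | none => s  -- Python raises IndexError here; unreachable under Pre_
        | some c2 => if c2 = '_' then String.ofList (pvReplaceFirstUS s.toList) else s
  -- ' '.join(s.split("_")) : separator is nonempty, so split? never returns none
  let s := PySem.Str.join " " ((PySem.Str.split? s "_").getD [])
  if PySem.Str.isIn "acid" s then
    PySem.Str.stripChars (PySem.Str.join " " ((PySem.Str.split? s "acid").getD [])) " " ++ " acid"
  else s

-- ===== PORT A =====
def pvDbNamesMatchHmdb (mdd : PySem.Dict String Int) (hd : PySem.Dict String (List String)) : PySem.Dict String (List String) :=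
  mdd.keys.foldl (fun d name =>
    d.insert name (hd.items.foldl (fun idl p => if p.2.contains name then idl ++ [p.1] else idl) [])) PySem.Dict.empty

def input_match_db (mixture_list : List String) (match_data_dict : List (String × Int)) (hmdb_dict : List (String × List String)) : List String :=
  let mdd := PySem.Dict.ofList match_data_dict
  let hd := PySem.Dict.ofList hmdb_dict
  let format_mixture_list := mixture_list.foldl (fun acc meta_name => acc ++ [pvFmtName meta_name]) []
  let db_names_ids_dict := pvDbNamesMatchHmdb mdd hd
  format_mixture_list.foldl (fun out m =>
    if mdd.contains m then out ++ [m]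
    else
      let idx_list := hd.items.foldl (fun idl p => if p.2.contains m then idl ++ [p.1] else idl) []
      db_names_ids_dict.items.foldl (fun out q =>
        if (PySem.Set.ofList idx_list).inter (PySem.Set.ofList q.2) ≠ [] then out ++ [q.1] else out) out) []

-- ===== PORT B =====
def input_match_db_alt (mixture_list : List String) (match_data_dict : List (String × Int)) (hmdb_dict : List (String × List String)) : List String :=
  let mdd := PySem.Dict.ofList match_data_dict
  let hd := PySem.Dict.ofList hmdb_dict
  let index := hd.items.foldl (fun d p => p.2.foldl (fun d n => d.modify n [] (fun l => l ++ [p.1])) d) PySem.Dict.empty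
  let db_sets := mdd.keys.map (fun dn => (dn, PySem.Set.ofList (index.getD dn [])))
  mixture_list.foldl (fun out meta_name =>
    let m := pvFmtName meta_name
    if mdd.contains m then out ++ [m]
    else
      let ids_m := PySem.Set.ofList (index.getD m [])
      out ++ (db_sets.filter (fun p => !(PySem.Set.isdisjoint ids_m p.2))).map (·.1)) []

-- ===== PRECONDITION & SPEC =====
-- Pre_ excludes exactly the inputs on which A raises IndexError: a mixture name whose
-- lowercase form has no character at index 1, or has no '_' at index 1 and no character at index 2.
def Pre_input_match_db (mixture_list : List String) (_match_data_dict : List (String × Int)) (_hmdb_dict : List (String × List String)) : Prop :=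
  ∀ s ∈ mixture_list, PySem.Str.pyGet? (PySem.Str.lower s) 1 = some '_' ∨ (PySem.Str.pyGet? (PySem.Str.lower s) 2).isSome
instance (mixture_list : List String) (match_data_dict : List (String × Int)) (hmdb_dict : List (String × List String)) : Decidable (Pre_input_match_db mixture_list match_data_dict hmdb_dict) := by unfold Pre_input_match_db; infer_instance

def pvWitness_input_match_db : List String × (List (String × Int)) × (List (String × List String)) :=
  (["L_lysine", "Citric_acid"], [("l-lysine", 1), ("other", 2)], [("h1", ["citric acid", "other"])])

def Spec_input_match_db (mixture_list : List String) (match_data_dict : List (String × Int)) (hmdb_dict : List (String × List String)) (out : List String) : Prop := out = input_match_db_alt mixture_list match_data_dict hmdb_dict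
instance (mixture_list : List String) (match_data_dict : List (String × Int)) (hmdb_dict : List (String × List String)) (out : List String) : Decidable (Spec_input_match_db mixture_list match_data_dict hmdb_dict out) := by unfold Spec_input_match_db; infer_instance

-- ===== CLAIM (what is proved, stated in full; the proofs are below) =====
def Claim_equal_input_match_db : Prop := ∀ (mixture_list : List String) (match_data_dict : List (String × Int)) (hmdb_dict : List (String × List String)), Dom_input_match_db mixture_list match_data_dict hmdb_dict → Pre_input_match_db mixture_list match_data_dict hmdb_dict → Spec_input_match_db mixture_list match_data_dict hmdb_dict (input_match_db mixture_list match_data_dict hmdb_dict)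

-- ===== LEMMAS AND PROOFS =====

-- A's inner hmdb scan, as a filter-map
theorem pv_idsA_eq (H : List (String × List String)) (m : String) :
    H.foldl (fun idl p => if p.2.contains m then idl ++ [p.1] else idl) [] =
      (H.filter (fun p => p.2.contains m)).map (·.1) := by
  simpa using PySem.List.foldl_append_if (fun p => p.2.contains m) (·.1) H []

-- B's inverted index, looked up at any key
theorem pv_index_getD (H : List (String × List String)) (c : String) :
    ((H.foldl (fun d p => p.2.foldl (fun d n => d.modify n [] (fun l => l ++ [p.1])) d) PySem.Dict.empty).getD c []) =
      ((H.flatMap (fun p => p.2.map (fun n => (n, p.1)))).filter (fun q => q.1 == c)).map (·.2) := by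
  have h1 : (fun (d : PySem.Dict String (List String)) (p : String × List String) =>
        p.2.foldl (fun d n => d.modify n [] (fun l => l ++ [p.1])) d)
      = (fun d p => ((p.2.map (fun n => (n, p.1))).foldl
          (fun d q => d.modify q.1 [] (fun l => l ++ [q.2])) d)) := by
    funext d p; rw [List.foldl_map]
  rw [h1, ← List.foldl_flatMap, PySem.Dict.getD_foldl_modify_append, PySem.Dict.getD_empty,
    List.nil_append]

theorem pv_mem_idsA (H : List (String × List String)) (m i : String) :
    i ∈ (H.filter (fun p => p.2.contains m)).map (·.1) ↔ ∃ p ∈ H, m ∈ p.2 ∧ p.1 = i := by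
  simp [List.mem_filter]

theorem pv_mem_idsB (H : List (String × List String)) (m i : String) :
    i ∈ ((H.flatMap (fun p => p.2.map (fun n => (n, p.1)))).filter (fun q => q.1 == m)).map (·.2) ↔
      ∃ p ∈ H, m ∈ p.2 ∧ p.1 = i := by
  simp [List.mem_filter]

-- nonempty intersection = not disjoint, for membership-equivalent id lists
theorem pv_cond_eq (a b a' b' : List String)
    (ha : ∀ x, x ∈ a ↔ x ∈ a') (hb : ∀ x, x ∈ b ↔ x ∈ b') :
    (decide ((PySem.Set.ofList a).inter (PySem.Set.ofList b) ≠ [])) =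
      !(PySem.Set.isdisjoint (PySem.Set.ofList a') (PySem.Set.ofList b')) := by
  have key : ((PySem.Set.ofList a).inter (PySem.Set.ofList b) ≠ []) ↔
      ¬ (PySem.Set.isdisjoint (PySem.Set.ofList a') (PySem.Set.ofList b') = true) := by
    rw [PySem.Set.isdisjoint_iff]
    constructor
    · intro hne hdis
      rcases List.exists_mem_of_ne_nil _ hne with ⟨y, hy⟩
      rw [PySem.Set.mem_inter] at hy
      exact hdis y (by rw [PySem.Set.mem_ofList, ← ha, ← PySem.Set.mem_ofList]; exact hy.1)
        (by rw [PySem.Set.mem_ofList, ← hb, ← PySem.Set.mem_ofList]; exact hy.2)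
    · intro hdis hnil
      apply hdis
      intro x hx hx'
      have : x ∈ (PySem.Set.ofList a).inter (PySem.Set.ofList b) := by
        rw [PySem.Set.mem_inter, PySem.Set.mem_ofList, PySem.Set.mem_ofList]
        rw [PySem.Set.mem_ofList] at hx hx'
        exact ⟨(ha x).mpr hx, (hb x).mpr hx'⟩
      rw [hnil] at this
      exact (List.not_mem_nil) this
  cases hdis : PySem.Set.isdisjoint (PySem.Set.ofList a') (PySem.Set.ofList b') with
  | false => simp [key, hdis]
  | true => simp [key, hdis]

-- A's db_names dict: its items list, explicitly
theorem pv_dn_items (mdd : PySem.Dict String Int) (hd : PySem.Dict String (List String)) (hnd : mdd.keys.Nodup) :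
    (pvDbNamesMatchHmdb mdd hd).items =
      mdd.keys.map (fun k => (k, hd.items.foldl (fun idl p => if p.2.contains k then idl ++ [p.1] else idl) [])) := by
  unfold pvDbNamesMatchHmdb
  have := PySem.Dict.items_foldl_insert_fresh (l := mdd.keys) (k := fun a => a)
    (v := fun name => hd.items.foldl (fun idl p => if p.2.contains name then idl ++ [p.1] else idl) [])
    (d := PySem.Dict.empty)
    (by intro a _; exact PySem.Dict.contains_empty a)
    (by simpa using hnd)
  simpa using this

theorem pv_else_branch (out : List String) (K : List String) (a : List String)
    (F : String → List String) (ids_m : PySem.Set String) (Gs : String → PySem.Set String)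
    (h : ∀ k ∈ K, (decide ((PySem.Set.ofList a).inter (PySem.Set.ofList (F k)) ≠ [])) =
        !(PySem.Set.isdisjoint ids_m (Gs k))) :
    (K.map (fun k => (k, F k))).foldl (fun out q =>
        if (PySem.Set.ofList a).inter (PySem.Set.ofList q.2) ≠ [] then out ++ [q.1] else out) out
      = out ++ ((K.map (fun k => (k, Gs k))).filter (fun p => !(PySem.Set.isdisjoint ids_m p.2))).map (·.1) := by
  rw [List.foldl_map,
    PySem.List.foldl_append_ite
      (p := fun k => (PySem.Set.ofList a).inter (PySem.Set.ofList (F k)) ≠ []) (f := fun k => k),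
    List.filter_map, List.map_map]
  simp only [Function.comp_def]
  congr 1
  exact congrArg _ (List.filter_congr h)

theorem input_match_db_spec_aux (mixture_list : List String) (match_data_dict : List (String × Int)) (hmdb_dict : List (String × List String)) :
    input_match_db mixture_list match_data_dict hmdb_dict = input_match_db_alt mixture_list match_data_dict hmdb_dict := by
  unfold input_match_db input_match_db_alt
  rw [PySem.List.foldl_append_singleton_eq_map, List.nil_append, List.foldl_map]
  apply PySem.List.foldl_congr_mem
  intro out x _
  by_cases hc : (PySem.Dict.ofList match_data_dict).contains (pvFmtName x)
  · simp only [hc, if_true]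
  · simp only [hc, Bool.false_eq_true, if_false]
    rw [pv_dn_items _ _ (PySem.Dict.nodup_keys_ofList _)]
    refine pv_else_branch out _ _ _ _ _ ?_
    intro k _
    rw [pv_idsA_eq, pv_idsA_eq, pv_index_getD, pv_index_getD]
    exact pv_cond_eq _ _ _ _
      (fun i => (pv_mem_idsA (PySem.Dict.ofList hmdb_dict).items (pvFmtName x) i).trans
        (pv_mem_idsB (PySem.Dict.ofList hmdb_dict).items (pvFmtName x) i).symm)
      (fun i => (pv_mem_idsA (PySem.Dict.ofList hmdb_dict).items k i).trans
        (pv_mem_idsB (PySem.Dict.ofList hmdb_dict).items k i).symm)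

-- ===== VERDICT (by name: the statement is the Claim_ definition above) =====
theorem input_match_db_spec : Claim_equal_input_match_db := by
  intro mixture_list match_data_dict hmdb_dict _ _
  unfold Spec_input_match_db
  exact input_match_db_spec_aux mixture_list match_data_dict hmdb_dict
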